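-- pv_equiv track=rewrite | github.com/putian74/DAG-align | DAG_tools.py | search_increasing_blocks
-- ===== SOURCE A (Python) =====
-- def search_increasing_blocks(numbers, min_length=10, max_dif=10):
--
--     valid_indices = [(i, num) for i, num in enumerate(numbers) if num != -1]
--     if not len(valid_indices) > 1:
--         return []
--     blocks = []
--     start_idx, start_num = valid_indices[0]
--     prev_num = start_num
--     prev_idx = start_idx
--     for curr_idx, curr_num in valid_indices[1:]:
--         idx_diff = curr_idx - prev_idx
--         num_diff = curr_num - prev_num
--         if curr_num >= prev_num and abs(idx_diff - num_diff) < max_dif: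
--             pass
--         else:
--             block_length = prev_idx - start_idx + 1
--             if block_length >= min_length:
--                 blocks.append((start_num, prev_num))
--             start_idx, start_num = curr_idx, curr_num
--         prev_num = curr_num
--         prev_idx = curr_idx
--     block_length = curr_idx - start_idx + 1
--     if block_length >= min_length:
--         blocks.append((start_num, curr_num))
--     return blocks
-- ===== SOURCE B (Python) =====
-- def search_increasing_blocks(numbers, min_length=10, max_dif=10):
--     valid = [(i, num) for i, num in enumerate(numbers) if num != -1]
--     if len(valid) <= 1:
--         return []
--     segments = _split_segments(valid, max_dif)
--     return [(f[1], l[1]) for (f, l) in segments if l[0] - f[0] + 1 >= min_length]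
--
--
-- def _chained(p, c, max_dif):
--     return c[1] >= p[1] and abs((c[0] - p[0]) - (c[1] - p[1])) < max_dif
--
--
-- def _split_segments(pairs, max_dif):
--     """Split into maximal chained runs; each run reported as (first, last)."""
--     if not pairs:
--         return []
--     first = pairs[0]
--     last = first
--     k = 1
--     while k < len(pairs) and _chained(last, pairs[k], max_dif):
--         last = pairs[k]
--         k += 1
--     return [(first, last)] + _split_segments(pairs[k:], max_dif)
-- ===== Notes on version B (the rewrite author's own statement) =====
-- stated objective: simpler
-- what changed: Replaces A's single scan with carried start/prev state and in-loop emission by a two-phase decomposition: split the valid (index,value) pairs into maximal chained runs (inner while per run), then a filter/map comprehension turns the runs into output pairs.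
import Mathlib
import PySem

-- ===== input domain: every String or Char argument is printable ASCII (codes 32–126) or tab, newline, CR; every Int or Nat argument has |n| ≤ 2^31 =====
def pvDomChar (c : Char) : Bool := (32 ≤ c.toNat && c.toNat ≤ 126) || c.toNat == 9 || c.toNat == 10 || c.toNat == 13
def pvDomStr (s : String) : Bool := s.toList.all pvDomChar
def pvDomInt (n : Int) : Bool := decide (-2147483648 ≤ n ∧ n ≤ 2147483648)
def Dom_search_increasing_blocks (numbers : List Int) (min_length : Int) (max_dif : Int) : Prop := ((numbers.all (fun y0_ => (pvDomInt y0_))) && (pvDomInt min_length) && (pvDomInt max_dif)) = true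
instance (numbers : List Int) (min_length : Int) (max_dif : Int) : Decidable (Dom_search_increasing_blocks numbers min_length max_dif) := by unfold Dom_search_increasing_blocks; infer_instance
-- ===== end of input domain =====

-- B replaces A's inline scan (carried start/prev state, emitting inside the loop) by a
-- two-phase decomposition: first split the valid (index,value) pairs into maximal chained
-- runs, then filter/map the runs into the output; objective: simpler. Same return value.

-- ===== PORT A =====
-- the comprehension [(i, num) for i, num in enumerate(numbers) if num != -1],
-- identical in both Pythons
def pvValidIndices : List Int → Int → List (Int × Int)
  | [], _ => []
  | num :: t, i => if num ≠ -1 then (i, num) :: pvValidIndices t (i + 1)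
                   else pvValidIndices t (i + 1)

-- A's for-loop over valid_indices[1:], state (blocks, start_idx, start_num, prev_idx, prev_num)
def pvALoop (min_length max_dif : Int)
    (blocks : List (Int × Int)) (start_idx start_num prev_idx prev_num : Int) :
    List (Int × Int) → List (Int × Int) × Int × Int × Int × Int
  | [] => (blocks, start_idx, start_num, prev_idx, prev_num)
  | (ci, cn) :: rest =>
    let idx_diff := ci - prev_idx
    let num_diff := cn - prev_num
    if cn ≥ prev_num ∧ |idx_diff - num_diff| < max_dif then
      pvALoop min_length max_dif blocks start_idx start_num ci cn rest
    else
      let block_length := prev_idx - start_idx + 1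
      let blocks' := if block_length ≥ min_length then blocks ++ [(start_num, prev_num)] else blocks
      pvALoop min_length max_dif blocks' ci cn ci cn rest

def search_increasing_blocks (numbers : List Int) (min_length : Int) (max_dif : Int) : List (Int × Int) :=
  let valid := pvValidIndices numbers 0
  match valid with
  | [] => []          -- not len(valid_indices) > 1
  | [_] => []
  | (si, sn) :: rest =>
    let st := pvALoop min_length max_dif [] si sn si sn rest
    let (blocks, start_idx, start_num, prev_idx, prev_num) := st
    -- after the loop curr_idx/curr_num are the last pair processed, i.e. prev_idx/prev_num
    -- (rest is nonempty here, so the loop body ran at least once)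
    let block_length := prev_idx - start_idx + 1
    if block_length ≥ min_length then blocks ++ [(start_num, prev_num)] else blocks

-- ===== PORT B =====
-- B's copy of the comprehension [(i, num) for i, num in enumerate(numbers) if num != -1]
def pvValidPairs : List Int → Int → List (Int × Int)
  | [], _ => []
  | num :: t, i => if num ≠ -1 then (i, num) :: pvValidPairs t (i + 1)
                   else pvValidPairs t (i + 1)

def pvChained (max_dif : Int) (p c : Int × Int) : Bool :=
  c.2 ≥ p.2 && |(c.1 - p.1) - (c.2 - p.2)| < max_dif

-- the inner while: extend the run while chained, returning (last, remaining suffix)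
def pvRun (max_dif : Int) (last : Int × Int) :
    List (Int × Int) → (Int × Int) × List (Int × Int)
  | [] => (last, [])
  | c :: t => if pvChained max_dif last c then pvRun max_dif c t else (last, c :: t)

theorem pvRun_length (max_dif : Int) :
    ∀ (t : List (Int × Int)) (last : Int × Int), (pvRun max_dif last t).2.length ≤ t.length := by
  intro t
  induction t with
  | nil => intro last; simp [pvRun]
  | cons c t ih =>
    intro last
    simp only [pvRun]
    split
    · exact Nat.le_succ_of_le (ih c)
    · simp

def pvSplitSegments (max_dif : Int) : List (Int × Int) → List ((Int × Int) × (Int × Int))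
  | [] => []
  | f :: t =>
    let r := pvRun max_dif f t
    (f, r.1) :: pvSplitSegments max_dif r.2
termination_by l => l.length
decreasing_by
  simp only [List.length_cons]
  exact Nat.lt_succ_of_le (pvRun_length max_dif t f)

-- the final comprehension: filter by index span, project the two values
def pvEmit (min_length : Int) (segs : List ((Int × Int) × (Int × Int))) : List (Int × Int) :=
  (segs.filter (fun s => s.2.1 - s.1.1 + 1 ≥ min_length)).map (fun s => (s.1.2, s.2.2))

def search_increasing_blocks_alt (numbers : List Int) (min_length : Int) (max_dif : Int) : List (Int × Int) :=
  let valid := pvValidPairs numbers 0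
  if valid.length ≤ 1 then []          -- len(valid) <= 1
  else pvEmit min_length (pvSplitSegments max_dif valid)

-- ===== PRECONDITION & SPEC =====
def Spec_search_increasing_blocks (numbers : List Int) (min_length : Int) (max_dif : Int) (out : List (Int × Int)) : Prop := out = search_increasing_blocks_alt numbers min_length max_dif
instance (numbers : List Int) (min_length : Int) (max_dif : Int) (out : List (Int × Int)) : Decidable (Spec_search_increasing_blocks numbers min_length max_dif out) := by unfold Spec_search_increasing_blocks; infer_instance

-- ===== CLAIM (what is proved, stated in full; the proofs are below) =====
def Claim_equal_search_increasing_blocks : Prop := ∀ (numbers : List Int) (min_length : Int) (max_dif : Int), Dom_search_increasing_blocks numbers min_length max_dif → Spec_search_increasing_blocks numbers min_length max_dif (search_increasing_blocks numbers min_length max_dif)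

-- ===== LEMMAS AND PROOFS =====

-- A's post-loop finalisation applied to the loop's end state
def pvFinish (min_length : Int) (st : List (Int × Int) × Int × Int × Int × Int) : List (Int × Int) :=
  let (blocks, start_idx, start_num, prev_idx, prev_num) := st
  if prev_idx - start_idx + 1 ≥ min_length then blocks ++ [(start_num, prev_num)] else blocks

-- Main invariant: A's loop (then finalisation) from state (blocks, start, prev) equals
-- blocks ++ the emission of the current run (extended by pvRun) and the remaining segments.
theorem pvEmit_cons (min_length : Int) (s : (Int × Int) × (Int × Int))
    (segs : List ((Int × Int) × (Int × Int))) :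
    pvEmit min_length (s :: segs) =
      (if s.2.1 - s.1.1 + 1 ≥ min_length then [(s.1.2, s.2.2)] else []) ++ pvEmit min_length segs := by
  simp only [pvEmit, List.filter_cons]
  by_cases h : s.2.1 - s.1.1 + 1 ≥ min_length
  · simp [h]
  · simp [h]

theorem pvALoop_eq (min_length max_dif : Int) :
    ∀ (t : List (Int × Int)) (blocks : List (Int × Int)) (si sn pi pn : Int),
      pvFinish min_length (pvALoop min_length max_dif blocks si sn pi pn t) =
        blocks ++ pvEmit min_length
          (((si, sn), (pvRun max_dif (pi, pn) t).1) ::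
            pvSplitSegments max_dif (pvRun max_dif (pi, pn) t).2) := by
  intro t
  induction t with
  | nil =>
    intro blocks si sn pi pn
    simp only [pvALoop, pvFinish, pvRun, pvSplitSegments, pvEmit, List.filter]
    split_ifs with h
    · simp [h]
    · simp [h]
  | cons c t ih =>
    intro blocks si sn pi pn
    obtain ⟨ci, cn⟩ := c
    simp only [pvALoop, pvRun, pvChained]
    by_cases hc : cn ≥ pn ∧ |ci - pi - (cn - pn)| < max_dif
    · have hb : (decide (cn ≥ pn) && decide (|(ci - pi) - (cn - pn)| < max_dif)) = true := by
        simp [hc.1, hc.2]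
      simp only [if_pos hc, hb]
      exact ih blocks si sn ci cn
    · have hb : ¬ ((decide (cn ≥ pn) && decide (|(ci - pi) - (cn - pn)| < max_dif)) = true) := by
        simp only [Bool.and_eq_true, decide_eq_true_eq]
        exact hc
      simp only [if_neg hc, if_neg hb]
      rw [ih]
      simp only [pvSplitSegments]
      rw [pvEmit_cons min_length ((si, sn), (pi, pn))]
      rw [← List.append_assoc]
      have hbl : (if pi - si + 1 ≥ min_length then blocks ++ [(sn, pn)] else blocks) =
          blocks ++ (if ((si, sn), (pi, pn)).2.1 - ((si, sn), (pi, pn)).1.1 + 1 ≥ min_length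
                       then [((((si, sn), (pi, pn)) : (Int × Int) × (Int × Int)).1.2,
                              (((si, sn), (pi, pn)) : (Int × Int) × (Int × Int)).2.2)] else []) := by
        split_ifs with h
        · rfl
        · simp
      rw [hbl]

theorem pvValidPairs_eq (l : List Int) : ∀ i, pvValidPairs l i = pvValidIndices l i := by
  induction l with
  | nil => intro i; rfl
  | cons n t ih =>
    intro i
    simp only [pvValidPairs, pvValidIndices, ih]

theorem search_increasing_blocks_eq (numbers : List Int) (min_length max_dif : Int) :
    search_increasing_blocks numbers min_length max_dif =
      search_increasing_blocks_alt numbers min_length max_dif := by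
  unfold search_increasing_blocks search_increasing_blocks_alt
  rw [pvValidPairs_eq]
  cases hv : pvValidIndices numbers 0 with
  | nil => rfl
  | cons v rest =>
    cases rest with
    | nil => rfl
    | cons w rest' =>
      obtain ⟨si, sn⟩ := v
      have hlen : ¬ (((si, sn) :: w :: rest').length ≤ 1) := by simp
      rw [if_neg hlen]
      have h := pvALoop_eq min_length max_dif (w :: rest') [] si sn si sn
      simp only [pvFinish, List.nil_append] at h
      simp only [pvSplitSegments]
      exact h

-- ===== VERDICT (by name: the statement is the Claim_ definition above) =====
theorem search_increasing_blocks_spec : Claim_equal_search_increasing_blocks := by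
  intro numbers min_length max_dif _
  unfold Spec_search_increasing_blocks
  exact search_increasing_blocks_eq numbers min_length max_dif
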